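-- pv_equiv track=rewrite | github.com/codingBear01/TIL | algorithms/2cote/python/implementation/questions/문자열_재정렬.py | exampleAnswer
-- ===== SOURCE A (Python) =====
-- def exampleAnswer(input):
--     result = []
--     value = 0
--
--     # 문자를 하나씩 확인
--     for x in input:
--         # 알파벳인 경우 result 리스트에 삽입
--         if x.isalpha():
--             result.append(x)
--         # 숫자인 경우 value에 더하기
--         else:
--             value += int(x)
--
--     # 알파벳 오름차순 정렬
--     result.sort()
--
--     # 숫자가 하나라도 존재하는 경우 가장 뒤에 삽입
--     if value != 0:
--         result.append(str(value))
--
--     # 리스트를 문자열로 변환하여 출력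
--     return "".join(result)
-- ===== SOURCE B (Python) =====
-- def exampleAnswer(input):
--     # digit sum in one comprehension; letters emitted by counting each DISTINCT
--     # letter present (sorted set of letters), so only distinct letters are sorted
--     value = sum(int(x) for x in input if not x.isalpha())
--     letters = "".join(c * input.count(c) for c in sorted(set(filter(str.isalpha, input))))
--     return letters + (str(value) if value != 0 else "")
-- ===== Notes on version B (the rewrite author's own statement) =====
-- stated objective: alternative
-- what changed: B replaces A's per-character append loop plus full sort of all letters by a digit-sum comprehension and a counting pass: it sorts only the DISTINCT letters present (sorted(set(...))) and emits each one input.count(c) times, so no full-length sort is performed and all letters (including non-ASCII ones A accepts) are handled identically to A.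
import Mathlib
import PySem

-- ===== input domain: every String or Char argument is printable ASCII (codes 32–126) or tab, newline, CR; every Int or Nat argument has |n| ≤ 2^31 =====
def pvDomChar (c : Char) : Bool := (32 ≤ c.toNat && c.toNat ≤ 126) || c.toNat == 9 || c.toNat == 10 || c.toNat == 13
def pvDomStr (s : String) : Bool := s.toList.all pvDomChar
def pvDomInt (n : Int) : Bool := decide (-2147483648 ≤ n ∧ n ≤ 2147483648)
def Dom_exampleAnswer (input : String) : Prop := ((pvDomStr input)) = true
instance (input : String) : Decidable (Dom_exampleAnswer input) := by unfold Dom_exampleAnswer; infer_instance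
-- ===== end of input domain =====

-- One honest line: B sums the digits in one comprehension and sorts only the
-- DISTINCT letters present, emitting each count-many times (no full-length sort);
-- alternative algorithm, same result on every input A accepts.

-- ===== PORT A =====
-- loop over characters: alphabetic chars are appended to result, others go through int(x)
-- (int(x) is total here thanks to Pre_; .getD 0 is never reached inside Pre_)
def exampleAnswerChars (cs : List Char) : List Char :=
  let st := cs.foldl
    (fun (st : List Char × Int) x =>
      if PySem.Chars.isalpha x then (st.1 ++ [x], st.2)
      else (st.1, st.2 + (PySem.Int.ofChars? [x]).getD 0))
    ([], 0)
  let result := PySem.List.sorted st.1 (fun c => c) false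
  if st.2 ≠ 0 then result ++ PySem.Int.toChars st.2 else result

def exampleAnswer (input : String) : String :=
  String.ofList (exampleAnswerChars input.toList)

-- ===== PORT B =====
-- input.count(c): Python substring count for a 1-char needle = List.count
def exampleAnswerAltChars (cs : List Char) : List Char :=
  let value := ((cs.filter (fun x => !PySem.Chars.isalpha x)).map
      (fun x => (PySem.Int.ofChars? [x]).getD 0)).sum
  let letters := (PySem.List.sorted
      (PySem.Set.ofList (cs.filter (fun x => PySem.Chars.isalpha x))) (fun c => c) false).flatMap
      (fun c => List.replicate (cs.count c) c)
  letters ++ (if value ≠ 0 then PySem.Int.toChars value else [])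

def exampleAnswer_alt (input : String) : String :=
  String.ofList (exampleAnswerAltChars input.toList)

-- ===== PRECONDITION & SPEC =====
-- Pre_: every character is alphabetic or a decimal digit — on any other character
-- of the (ASCII) domain, Python A raises ValueError at int(x).
def Pre_exampleAnswer (input : String) : Prop :=
  input.toList.all (fun c => PySem.Chars.isalpha c || PySem.Chars.isdigit c) = true
instance (input : String) : Decidable (Pre_exampleAnswer input) := by
  unfold Pre_exampleAnswer; infer_instance

def pvWitness_exampleAnswer : String := "K1KA5CB7"

def Spec_exampleAnswer (input : String) (out : String) : Prop := out = exampleAnswer_alt input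
instance (input : String) (out : String) : Decidable (Spec_exampleAnswer input out) := by unfold Spec_exampleAnswer; infer_instance

-- ===== CLAIM (what is proved, stated in full; the proofs are below) =====
def Claim_equal_exampleAnswer : Prop := ∀ (input : String), Dom_exampleAnswer input → Pre_exampleAnswer input → Spec_exampleAnswer input (exampleAnswer input)

-- ===== LEMMAS AND PROOFS =====

-- A's loop computes (filter isalpha, digit sum) in one pass
lemma foldA_eq (cs : List Char) (acc : List Char × Int) :
    cs.foldl
      (fun (st : List Char × Int) x =>
        if PySem.Chars.isalpha x then (st.1 ++ [x], st.2)
        else (st.1, st.2 + (PySem.Int.ofChars? [x]).getD 0))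
      acc
    = (acc.1 ++ cs.filter (fun x => PySem.Chars.isalpha x),
       acc.2 + ((cs.filter (fun x => !PySem.Chars.isalpha x)).map
          (fun x => (PySem.Int.ofChars? [x]).getD 0)).sum) := by
  induction cs generalizing acc with
  | nil => simp
  | cons x xs ih =>
    by_cases h : PySem.Chars.isalpha x = true <;>
      simp [List.foldl_cons, h, ih, List.append_assoc, add_assoc]

lemma count_flatMap_replicate (A : List Char) (hA : A.Nodup) (f : Char → Nat) (a : Char) :
    (A.flatMap (fun c => List.replicate (f c) c)).count a
      = if a ∈ A then f a else 0 := by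
  induction A with
  | nil => simp
  | cons c t ih =>
    rcases List.nodup_cons.mp hA with ⟨hc, ht⟩
    rw [List.flatMap_cons, List.count_append, List.count_replicate, ih ht]
    by_cases hac : a = c
    · subst hac; simp [hc]
    · simp [hac, Ne.symm hac, List.mem_cons]

lemma pairwise_flatMap_replicate (A : List Char) (hA : A.Pairwise (· < ·)) (f : Char → Nat) :
    (A.flatMap (fun c => List.replicate (f c) c)).Pairwise (· ≤ ·) := by
  induction A with
  | nil => simp
  | cons c t ih =>
    rcases List.pairwise_cons.mp hA with ⟨hc, ht⟩
    rw [List.flatMap_cons]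
    refine List.pairwise_append.mpr ⟨?_, ih ht, ?_⟩
    · exact List.pairwise_replicate.mpr (Or.inr le_rfl)
    · intro x hx y hy
      have hxc : x = c := List.eq_of_mem_replicate hx
      rcases List.mem_flatMap.mp hy with ⟨d, hd, hyd⟩
      have hyd' : y = d := List.eq_of_mem_replicate hyd
      rw [hxc, hyd']
      exact le_of_lt (hc d hd)

-- B's letter block is a permutation of A's filtered letters
lemma letters_perm (cs : List Char) :
    ((PySem.List.sorted
        (PySem.Set.ofList (cs.filter (fun x => PySem.Chars.isalpha x))) (fun c => c) false).flatMap
        (fun c => List.replicate (cs.count c) c)).Perm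
      (cs.filter (fun x => PySem.Chars.isalpha x)) := by
  set K := PySem.List.sorted
      (PySem.Set.ofList (cs.filter (fun x => PySem.Chars.isalpha x))) (fun c => c) false with hK
  have hlt : K.Pairwise (· < ·) := PySem.List.sorted_ofList_pairwise_lt _
  have hnd : K.Nodup := hlt.imp (fun h => ne_of_lt h)
  have hmem : ∀ a : Char, a ∈ K ↔ a ∈ cs.filter (fun x => PySem.Chars.isalpha x) := by
    intro a
    rw [hK, PySem.List.mem_sorted, PySem.Set.mem_ofList]
  rw [List.perm_iff_count]
  intro a
  rw [count_flatMap_replicate K hnd _ a]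
  by_cases h : a ∈ cs.filter (fun x => PySem.Chars.isalpha x)
  · have ha : PySem.Chars.isalpha a = true := by simpa using (List.mem_filter.mp h).2
    rw [if_pos ((hmem a).mpr h), List.count_filter (by simpa using ha)]
  · rw [if_neg (fun hm => h ((hmem a).mp hm))]
    symm
    rw [List.count_eq_zero]
    exact fun hmem' => h hmem'

lemma sorted_eq_letters (cs : List Char) :
    PySem.List.sorted (cs.filter (fun x => PySem.Chars.isalpha x)) (fun c => c) false
      = (PySem.List.sorted
          (PySem.Set.ofList (cs.filter (fun x => PySem.Chars.isalpha x))) (fun c => c) false).flatMap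
          (fun c => List.replicate (cs.count c) c) :=
  PySem.List.sorted_id_eq_of_perm_of_pairwise _ _ (letters_perm cs)
    (pairwise_flatMap_replicate _ (PySem.List.sorted_ofList_pairwise_lt _) _)

-- ===== VERDICT (by name: the statement is the Claim_ definition above) =====
theorem exampleAnswer_spec : Claim_equal_exampleAnswer := by
  intro input _ _
  show exampleAnswer input = exampleAnswer_alt input
  unfold exampleAnswer exampleAnswer_alt exampleAnswerChars exampleAnswerAltChars
  rw [foldA_eq]
  simp only [List.nil_append, zero_add]
  rw [sorted_eq_letters]
  split_ifs with h <;> simp
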